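/- GENERATED by tools/from_farm_form.py from prooffarm-gif/accepted/DGifGetImageHeader.2/Lemmas.lean (a worked proof of the farm's unit `DGifGetImageHeader.2`,
   accepted by the verdict) — do not edit. -/
import Gif.Spec.Units.DGifGetImageHeader_2
import Gif.Spec.AllSegs

/-!
  Lemmas for the unit `DGifGetImageHeader.2` (dgif_lib.c:375-382): the segment is walked in THREE STEPS that meet at the return
  addresses of its first two calls, with the design's assertion `Mid` there (its `cut` parameter takes any label).

      ih2_Win, ih2_body_carry   `Body` at a later state, over a footprint of stack / heap-region / cursor windows
      ih2_seg_word     0x108ecd … the call of DGifGetWord … 0x108ed9 (`ret7`): `Mid` → `Mid`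
      ih2_seg_read     0x108ed9 … 0x108e78 (a word failed) | the call of InternalRead … 0x108eef (`ret8`): `Mid` → `Mid` ∨ `Done`
      ih2_env_carry    the segment's own stores (return addresses, `gif.Error`) keep `HeapInv`, `GifOK`, `rem`
      ih2_Freed, ih2_free_none, ih2_free_some
                       what holds behind `GifFreeMapObject(gif->Image.ColorMap)` while the field dangles (NULL / the map)
      ih2_null_store   the store of NULL makes the state invariant whole again, for the forest without `icm`
      ih2_seg_free     0x108eef … 0x108ef8 (one byte read) | 0x108f8b … GifFreeMapObject … the store of NULL … 0x108e78:
                       `Mid` → `Mid` ∨ `Done` for the present heap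
-/

open X86 X86.User Asan ProgX.Base ProgX.Base.Spec Gif.Spec

set_option maxRecDepth 4000
set_option maxHeartbeats 4000000

namespace Gif.Spec.DGifGetImageHeader_2

/-- **A window that a step of this segment may write**: the function's stack below the saved registers, the contract's window
over the heap's region and its shadow, the cursor's `cur`. -/
def ih2_Win (R : Rd) (e : State) (w : Span) : Prop :=
  ((e.reg .rsp).toNat - 448 ≤ w.lo ∧ w.hi ≤ (e.reg .rsp).toNat - 48) ∨
  (0x800000 ≤ w.lo ∧ w.hi ≤ 0x1000020) ∨
  (R.cur ≤ w.lo ∧ w.hi ≤ R.cur + 8)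

/-- **`Body` AT A LATER STATE**, for a new heap `Hc'` and forest `Fc'`: the structural clauses (the seven stack slots, the footprint
since the entry) are carried over a footprint `ws` of windows of the kinds `ih2_Win`; the semantic clauses (`inv`, `region`,
`forest`, `ok`, `rem`) are the caller's. -/
theorem ih2_body_carry {cut cut' : Word} {H : Heap} {rest : List Obj} {frames : List (Nat × FrameLayout)} {F : Forest} {R : Rd}
    {Hc Fc Hc' Fc' : _} {u₀ e : State} {ret : Word} {v s : State}
    (hb : DGifGetImageHeader.Body cut H rest frames F R Hc Fc u₀ e ret v)
    (hrip : s.rip = cut') (hrsp : s.reg .rsp = e.reg .rsp - 136)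
    (hrbx : s.reg .rbx = v.reg .rbx) (hrbp : s.reg .rbp = v.reg .rbp)
    (hcode : (conv u₀).code.In s.mem) (habi : (conv u₀).inv s)
    {ws : List Span} (hs : Mem.SameExcept ws v.mem s.mem) (hws : ∀ w, w ∈ ws → ih2_Win R e w)
    (hinv : HeapInv Hc' rest (DGifGetImageHeader.framesIn frames e) ((e.reg .rsp).toNat - 136) s.mem)
    (hreg : SameRegion H Hc') (hfor : F.SameButIcm Fc') (hok : GifOK Hc' Fc' R s.mem)
    (hrem : rem R s.mem ≤ rem R v.mem) :
    DGifGetImageHeader.Body cut' H rest frames F R Hc' Fc' u₀ e ret s := by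
  have henv : Env H rest frames F R e := hb.pre.1
  have hroom : 0x700000 + 448 ≤ (e.reg .rsp).toNat := hb.entry.room
  have htop : (e.reg .rsp).toNat + 8 ≤ 0x800000 := hb.entry.top
  have hcur := henv.ctx.cursor_range henv.heap.inv.shadow
  -- no window meets the saved registers and the return address
  have hslots : ∀ off k : Nat, k ≤ off → off ≤ 48 → ∀ w, w ∈ ws →
      (e.reg .rsp).toNat - off + k ≤ w.lo ∨ w.hi ≤ (e.reg .rsp).toNat - off := by
    intro off k h1 h2 w hw
    rcases hws w hw with ⟨a, b⟩ | ⟨a, b⟩ | ⟨a, b⟩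
    · omega
    · omega
    · omega
  refine ⟨hb.entry, hb.pre, hrip, hrsp, hrbx.trans hb.rbx, hrbp.trans hb.rbp, ?_, ?_, ?_, ?_, ?_, ?_, ?_, hinv, hreg, hfor, hok,
    Nat.le_trans hrem hb.rem, ?_, hcode, habi⟩
  · exact slot_sameExcept hs (e.reg .rsp) 8 8 _ (by omega) (by omega) hb.slot_r15 (hslots _ _ (by omega) (by omega))
  · exact slot_sameExcept hs (e.reg .rsp) 16 8 _ (by omega) (by omega) hb.slot_r14 (hslots _ _ (by omega) (by omega))
  · exact slot_sameExcept hs (e.reg .rsp) 24 8 _ (by omega) (by omega) hb.slot_r13 (hslots _ _ (by omega) (by omega))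
  · exact slot_sameExcept hs (e.reg .rsp) 32 8 _ (by omega) (by omega) hb.slot_r12 (hslots _ _ (by omega) (by omega))
  · exact slot_sameExcept hs (e.reg .rsp) 40 8 _ (by omega) (by omega) hb.slot_rbp (hslots _ _ (by omega) (by omega))
  · exact slot_sameExcept hs (e.reg .rsp) 48 8 _ (by omega) (by omega) hb.slot_rbx (hslots _ _ (by omega) (by omega))
  · -- the return address
    have hlt := (e.reg .rsp).toNat_lt
    rw [hs.readLE (e.reg .rsp) 8 (by omega) ?_]
    · exact hb.slot_ra
    · intro w hw
      rcases hws w hw with ⟨a, b⟩ | ⟨a, b⟩ | ⟨a, b⟩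
      · omega
      · omega
      · omega
  · -- the footprint since the entry: every window of `ws` lies inside one of the contract's
    refine hb.same.step_same hs ?_
    intro w hw a h1 h2
    rcases hws w hw with ⟨k1, k2⟩ | ⟨k1, k2⟩ | ⟨k1, k2⟩
    · exact ⟨_, List.mem_cons_self, by simp only; omega, by simp only; omega⟩
    · exact ⟨_, List.mem_cons_of_mem _ (List.mem_cons_of_mem _ List.mem_cons_self), by simp only; omega, by simp only; omega⟩
    · exact ⟨_, List.mem_cons_of_mem _ (List.mem_cons_of_mem _ (List.mem_cons_of_mem _ List.mem_cons_self)),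
        by simp only; omega, by simp only; omega⟩

/-- **108ECDH … the call of DGifGetWord … 108ED9H (ret7)** (dgif_lib.c:375 `DGifGetWord(GifFile, &GifFile->Image.Height)`):
`rsi = gif + 52` (inside `[gif + 40, gif + 64)`), `rdi = gif`. The result in `eax` is not constrained: both arms of the test that
follows are walked. -/
theorem ih2_seg_word (Lay : Layout) (hLay : Lay.hi = 0x1000000) (μ : Microarch) (hμ : UserX.MicroOK μ) (u₀ : State)
    (hcode : HasCodeNat Lay u₀ Gif.L.DGifGetImageHeader.entry Gif.Code.code_DGifGetImageHeader.nat Gif.L.DGifGetImageHeader.size)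
    (H : Heap) (rest : List Obj) (frames : List (Nat × FrameLayout)) (F : Forest) (R : Rd) (e : State) (ret : Word)
    (h_DGifGetWord : Calls Lay μ ProgX.Base.WayInv (ProgX.Base.conv u₀) Gif.L.DGifGetWord.entry
      (Gif.Spec.DGifGetWord.spec H rest (DGifGetImageHeader.framesIn frames e) F R))
    (v : State) (hat : DGifGetImageHeader.Mid Gif.L.DGifGetImageHeader.at_108ecd H rest frames F R H F u₀ e ret v) :
    ReachVia Lay μ ProgX.Base.WayInv v
      (DGifGetImageHeader.Mid Gif.L.DGifGetImageHeader.ret7 H rest frames F R H F u₀ e ret) := by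
  -- THE PRELUDE: the entry assertion `Mid` = `Body` + `r12 = pv`
  obtain ⟨hbody, hr12⟩ := hat
  have he := hbody.entry
  v_entry he
  obtain ⟨henv, hrdi⟩ := hbody.pre
  have w_rip := hbody.rip
  have c_rsp : v.reg .rsp = e.reg .rsp - 136 := hbody.rsp
  have c_rbx : v.reg .rbx = e.reg .rdi := hbody.rbx
  have w_kept : RegsKept [.rsp] v v := RegsKept.refl _ _
  have w_eq : Mem.EqOn ProgX.Base.L.textLo ProgX.Base.L.textHi u₀.mem v.mem := ProgX.Base.conv_code_eqOn hbody.code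
  have hdf := (show abiInv _ from hbody.abi).1
  have hmx := (show abiInv _ from hbody.abi).2
  have hsse := ProgX.Base.sseOK_of_abiInv hbody.abi
  -- the slots and the footprint that `Body` at the exit states again
  have k_r15 : v.mem.readLE (e.reg .rsp - 8) 8 = (e.reg .r15).toNat := hbody.slot_r15
  have k_r14 : v.mem.readLE (e.reg .rsp - 16) 8 = (e.reg .r14).toNat := hbody.slot_r14
  have k_r13 : v.mem.readLE (e.reg .rsp - 24) 8 = (e.reg .r13).toNat := hbody.slot_r13
  have k_r12 : v.mem.readLE (e.reg .rsp - 32) 8 = (e.reg .r12).toNat := hbody.slot_r12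
  have k_rbp : v.mem.readLE (e.reg .rsp - 40) 8 = (e.reg .rbp).toNat := hbody.slot_rbp
  have k_rbx : v.mem.readLE (e.reg .rsp - 48) 8 = (e.reg .rbx).toNat := hbody.slot_rbx
  have k_ra : UInt64.ofNat (v.mem.readLE (e.reg .rsp) 8) = ret := hbody.slot_ra
  have hsame : Mem.SameExcept
    [⟨(e.reg .rsp).toNat - 448, (e.reg .rsp).toNat⟩,
     shadowSpan ((e.reg .rsp).toNat - 120) ((e.reg .rsp).toNat - 56),
     ⟨0x800000, 0x1000020⟩,
     ⟨R.cur, R.cur + 8⟩] e.mem v.mem := hbody.same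
  -- where the cursor and gif are, as numbers
  have hcur := henv.ctx.cursor_range henv.heap.inv.shadow
  have hgin := henv.ok.owns.inside henv.heap.inv.heap (o := (F.gif, 120)) List.mem_cons_self
  have hbase := henv.heap.base
  simp only at hgin
  rw [hbase] at hgin
  -- THE WALK, to the call's return address
  u_walk hcode [hμ.vendor] until [Gif.L.DGifGetImageHeader.ret7] span [ProgX.Base.L.textLo, ProgX.Base.L.textHi] side (v_side)
  case call_inv =>
    v_inv
  case pre_108ed4 =>
    -- DGIFGETWORD'S PRECONDITION: the environment for the frame list with the own frame in front (only the return address was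
    -- pushed since `v`), `rdi = gif`, `rsi = gif + 52`
    have hs : Mem.SameExcept [⟨(e.reg .rsp).toNat - 448, (e.reg .rsp).toNat - 136⟩] v.mem s_108ed4.mem := by
      rw [w_mem]
      u_same
    have henv' : Env H rest (DGifGetImageHeader.framesIn frames e) F R s_108ed4 := by
      refine henv.at_call hbody.inv hbody.ok hs (by omega) (by omega) ?_ ?_ ?_
      · rw [w_rsp]
        u_omega
      · rw [w_rsp]
        u_omega
      · rw [w_rsp]
        u_omega
    refine ⟨henv', ?_, Or.inr ⟨?_, ?_⟩⟩
    · rw [w_rdi]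
      exact hrdi
    · rw [w_rsi]
      u_omega
    · rw [w_rsi]
      u_omega
  -- 0x108ed9 (ret7): DGIFGETWORD HAS RETURNED
  obtain ⟨hback, -, -, -⟩ := w_post
  have hs0 : Mem.SameExcept [⟨(e.reg .rsp).toNat - 448, (e.reg .rsp).toNat - 136⟩] v.mem s_108ed4.mem := by
    rw [w_mem_108ed4]
    u_same
  have hrem0 : rem R s_108ed4.mem = rem R v.mem := by
    apply rem_sameExcept hs0 (by omega)
    intro w hw
    have e := List.mem_singleton.mp hw
    rw [e]
    simp only
    omega
  have e_top : (s_108ed4.reg .rsp).toNat + 8 = (e.reg .rsp).toNat - 136 := by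
    rw [w_rsp_108ed4]
    u_omega
  -- the callee's footprint in terms of `v`
  v_after_call w_rsp_108ed4 w_mem_108ed4
  simp only [w_rsi_108ed4] at w_same
  -- the footprint since `v`: the pushed return address, then DGifGetWord's windows
  have hs1 : Mem.SameExcept
    [⟨(e.reg .rsp).toNat - 448, (e.reg .rsp).toNat - 136⟩,
     ⟨F.gif + 52, F.gif + 56⟩,
     ⟨F.gif + 96, F.gif + 100⟩,
     ⟨R.cur, R.cur + 8⟩] v.mem s_108ed4r.mem := by u_same
  have hinv1 : HeapInv H rest (DGifGetImageHeader.framesIn frames e) ((e.reg .rsp).toNat - 136) s_108ed4r.mem := by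
    rw [← e_top]
    exact hback.inv
  -- THE EXIT ASSERTION: `Mid` at `ret7`
  refine ReachVia.done ⟨?_, ?_⟩
  · refine ih2_body_carry hbody w_rip w_rsp (w_kept.get .rbx rfl) (w_kept.get .rbp rfl) w_code w_inv hs1 ?_ hinv1
      (SameRegion.refl H) (Forest.SameButIcm.refl F) hback.ok ?_
    · simp only [List.forall_mem_cons, List.not_mem_nil, false_imp_iff, implies_true, and_true, ih2_Win]
      omega
    · rw [← hrem0]
      exact hback.rem
  · rw [w_kept.get .r12 rfl]
    exact hr12

/-- **108ED9H (ret7) … 108EA5H | the call of InternalRead … 108EEFH (ret8)** (dgif_lib.c:374-378): `test eax, eax`; a word failed: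
`r13d = 0` and to the epilogue (the heap and the forest are the entry's); otherwise `InternalRead(GifFile, Buf, 1)` with
`rsi = rsp + 0x30` = the frame's object `Buf` (base + 32, 3 bytes), `edx = 1`. -/
theorem ih2_seg_read (Lay : Layout) (hLay : Lay.hi = 0x1000000) (μ : Microarch) (hμ : UserX.MicroOK μ) (u₀ : State)
    (hcode : HasCodeNat Lay u₀ Gif.L.DGifGetImageHeader.entry Gif.Code.code_DGifGetImageHeader.nat Gif.L.DGifGetImageHeader.size)
    (H : Heap) (rest : List Obj) (frames : List (Nat × FrameLayout)) (F : Forest) (R : Rd) (e : State) (ret : Word)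
    (h_InternalRead : Calls Lay μ ProgX.Base.WayInv (ProgX.Base.conv u₀) Gif.L.InternalRead.entry
      (Gif.Spec.InternalRead.spec H rest (DGifGetImageHeader.framesIn frames e) F R 1))
    (v : State) (hat : DGifGetImageHeader.Mid Gif.L.DGifGetImageHeader.ret7 H rest frames F R H F u₀ e ret v) :
    ReachVia Lay μ ProgX.Base.WayInv v (fun w =>
      DGifGetImageHeader.Mid Gif.L.DGifGetImageHeader.ret8 H rest frames F R H F u₀ e ret w ∨
      DGifGetImageHeader.Done H rest frames F R H F u₀ e ret w) := by
  -- THE PRELUDE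
  obtain ⟨hbody, hr12⟩ := hat
  have he := hbody.entry
  v_entry he
  obtain ⟨henv, hrdi⟩ := hbody.pre
  have w_rip := hbody.rip
  have c_rsp : v.reg .rsp = e.reg .rsp - 136 := hbody.rsp
  have c_rbx : v.reg .rbx = e.reg .rdi := hbody.rbx
  -- `eax` as a variable `z` (the branch fact of `test eax, eax` speaks of it)
  obtain ⟨z, c_rax⟩ : ∃ z, v.reg .rax = z := ⟨_, rfl⟩
  have w_kept : RegsKept [.rsp] v v := RegsKept.refl _ _
  have w_eq : Mem.EqOn ProgX.Base.L.textLo ProgX.Base.L.textHi u₀.mem v.mem := ProgX.Base.conv_code_eqOn hbody.code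
  have hdf := (show abiInv _ from hbody.abi).1
  have hmx := (show abiInv _ from hbody.abi).2
  have hsse := ProgX.Base.sseOK_of_abiInv hbody.abi
  have hcur := henv.ctx.cursor_range henv.heap.inv.shadow
  have hgin := henv.ok.owns.inside henv.heap.inv.heap (o := (F.gif, 120)) List.mem_cons_self
  have hbase := henv.heap.base
  simp only at hgin
  rw [hbase] at hgin
  -- THE WALK, to the call's return address or to the epilogue
  u_walk hcode [hμ.vendor] until [Gif.L.DGifGetImageHeader.ret8, Gif.L.DGifGetImageHeader.at_108e78]
    span [ProgX.Base.L.textLo, ProgX.Base.L.textHi] side (v_side)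
  case call_inv =>
    v_inv
  case pre_108eea =>
    -- INTERNALREAD'S PRECONDITION: the environment with the own frame in front, `rdi = gif`, `edx = 1`, the buffer `Buf`
    have hs : Mem.SameExcept [⟨(e.reg .rsp).toNat - 448, (e.reg .rsp).toNat - 136⟩] v.mem s_108eea.mem := by
      rw [w_mem]
      u_same
    have henv' : Env H rest (DGifGetImageHeader.framesIn frames e) F R s_108eea := by
      refine henv.at_call hbody.inv hbody.ok hs (by omega) (by omega) ?_ ?_ ?_
      · rw [w_rsp]
        u_omega
      · rw [w_rsp]
        u_omega
      · rw [w_rsp]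
        u_omega
    -- the buffer is the frame's object `Buf` (`[rsp + 0x30]` = base + 32, 3 bytes), named by its numbers
    have ho : (⟨(e.reg .rsp).toNat - 120 + 32, 3, .stack⟩ : Obj) ∈
        Gif.Frames.DGifGetImageHeader.objsAt ((e.reg .rsp).toNat - 120) := List.mem_cons_self
    have hsz : Gif.Frames.DGifGetImageHeader.size = 64 := rfl
    have hb : (e.reg .rsp).toNat - 120 + Gif.Frames.DGifGetImageHeader.size ≤ (e.reg .rsp).toNat + 8 := by
      rw [hsz]
      omega
    have hbuf : BufOK H rest (DGifGetImageHeader.framesIn frames e) F R (s_108eea.reg .rsi).toNat 1 := by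
      apply BufOK.own henv.heap henv.ctx hbody.inv hb ho
      · rw [w_rsi]
        u_omega
      · rw [w_rsi]
        u_omega
    refine ⟨henv', ?_, ?_, by decide, by decide, hbuf⟩
    · rw [w_rdi]
      exact hrdi
    · rw [w_rdx]
      decide
  · -- 0x108e78 FROM 0x108eab: a word failed, `r13d = 0` (GIF_ERROR); nothing was stored
    have hs : Mem.SameExcept [] v.mem s_108eab.mem := by
      rw [w_mem]
      exact Mem.SameExcept.refl _ _
    have hbody1 : DGifGetImageHeader.Body Gif.L.DGifGetImageHeader.at_108e78 H rest frames F R H F u₀ e ret s_108eab := by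
      refine ih2_body_carry hbody w_rip w_rsp (w_kept.get .rbx rfl) (w_kept.get .rbp rfl) (ProgX.Base.conv_code_in w_eq) ?_ hs
        ?_ ?_ (SameRegion.refl H) (Forest.SameButIcm.refl F) ?_ ?_
      · refine ProgX.Base.abiInv_of ?_ ?_
        · rw [w_flags]
          simp only [X86.User.df_setStatus]
          exact hdf
        · rw [w_mxcsr]
          exact hmx
      · intro w hw
        exact absurd hw List.not_mem_nil
      · rw [w_mem]
        exact hbody.inv
      · rw [w_mem]
        exact hbody.ok
      · rw [w_mem]
        exact Nat.le_refl _
    refine ReachVia.done (Or.inr ⟨hbody1, ?_, ?_⟩)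
    · right
      rw [w_r13]
      decide
    · intro h1
      rw [w_r13] at h1
      exact absurd h1 (by decide)
  · -- 0x108eef (ret8): INTERNALREAD HAS RETURNED
    obtain ⟨k, -, -, -, -, -, hback⟩ : ReadPost H rest (DGifGetImageHeader.framesIn frames e) F R 1 s_108eea s_108eear := w_post
    have hs0 : Mem.SameExcept [⟨(e.reg .rsp).toNat - 448, (e.reg .rsp).toNat - 136⟩] v.mem s_108eea.mem := by
      rw [w_mem_108eea]
      u_same
    have hrem0 : rem R s_108eea.mem = rem R v.mem := by
      apply rem_sameExcept hs0 (by omega)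
      intro w hw
      have e := List.mem_singleton.mp hw
      rw [e]
      simp only
      omega
    have e_top : (s_108eea.reg .rsp).toNat + 8 = (e.reg .rsp).toNat - 136 := by
      rw [w_rsp_108eea]
      u_omega
    -- the callee's footprint in terms of `v`
    v_after_call w_rsp_108eea w_mem_108eea
    simp only [w_rsi_108eea] at w_same
    -- the footprint since `v`: the pushed return address, InternalRead's stack, the byte of `Buf`, the cursor
    have hs1 : Mem.SameExcept
      [⟨(e.reg .rsp).toNat - 448, (e.reg .rsp).toNat - 136⟩,
       ⟨(e.reg .rsp).toNat - 88, (e.reg .rsp).toNat - 87⟩,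
       ⟨R.cur, R.cur + 8⟩] v.mem s_108eear.mem := by u_same
    have hinv1 : HeapInv H rest (DGifGetImageHeader.framesIn frames e) ((e.reg .rsp).toNat - 136) s_108eear.mem := by
      rw [← e_top]
      exact hback.inv
    -- THE EXIT ASSERTION: `Mid` at `ret8`
    refine ReachVia.done (Or.inl ⟨?_, ?_⟩)
    · refine ih2_body_carry hbody w_rip w_rsp (w_kept.get .rbx rfl) (w_kept.get .rbp rfl) w_code w_inv hs1 ?_ hinv1
        (SameRegion.refl H) (Forest.SameButIcm.refl F) hback.ok ?_
      · simp only [List.forall_mem_cons, List.not_mem_nil, false_imp_iff, implies_true, and_true, ih2_Win]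
        omega
      · rw [← hrem0]
        exact hback.rem
    · rw [w_kept.get .r12 rfl]
      exact hr12

/-- **The heap's invariant, the state invariant and the reader's measure through the segment's own stores**: return addresses of
check calls (stack windows below the cursor) and `gif.Error`; no shadow byte written. -/
theorem ih2_env_carry {H : Heap} {rest : List Obj} {fr : List (Nat × FrameLayout)} {F : Forest} {R : Rd} {top : Nat}
    {mem mem' : Mem} {ws : List Span} (hinv : HeapInv H rest fr top mem) (hok : GifOK H F R mem)
    (hcur : 0x700000 ≤ R.cur ∧ R.cur + 16 ≤ 0x800000) (hbase : H.base = 0x800000)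
    (hun : ShadowUntouched mem mem') (hs : Mem.SameExcept ws mem mem')
    (hws : ∀ w, w ∈ ws → (0x700000 ≤ w.lo ∧ w.hi ≤ R.cur) ∨ (F.gif + 96 ≤ w.lo ∧ w.hi ≤ F.gif + 104)) :
    HeapInv H rest fr top mem' ∧ GifOK H F R mem' ∧ rem R mem' = rem R mem := by
  have hloose : ∀ w, w ∈ ws → Loose H F R w := by
    intro w hw
    rcases hws w hw with ⟨h1, h2⟩ | ⟨h1, h2⟩
    · exact Loose.stack hinv.heap h1 (by omega) h2
    · exact Loose.gifScalar (Or.inr (Or.inr ⟨h1, h2⟩))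
  have hwin : ∀ w, w ∈ ws → HeapWin H w := by
    intro w hw
    rcases hws w hw with ⟨h1, h2⟩ | ⟨h1, h2⟩
    · exact HeapWin.offHeap hinv.heap (Or.inl (by omega))
    · exact HeapWin.gif hinv.heap hok.owns (by omega) (by omega)
  refine ⟨hinv.sameExcept hun hs hwin, hok.sameExcept hinv.heap hcur hs hloose, ?_⟩
  exact rem_loose hs hloose hinv.heap (hok.owns.placed hinv.heap) hcur

/-- **WHAT HOLDS BEHIND `GifFreeMapObject(gif->Image.ColorMap)`**, at the memory `mem`, for the present heap `Hc`: the heap's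
invariant; the forest without `icm` is owned; the SHAPE IS STILL THE OLD FOREST'S (the field `gif.Image.ColorMap` dangles until the
store of NULL), and the old forest's objects are where they were. -/
structure ih2_Freed (H : Heap) (rest : List Obj) (fr : List (Nat × FrameLayout)) (F : Forest) (R : Rd) (top : Nat) (Hc : Heap)
    (mem : Mem) : Prop where
  inv : HeapInv Hc rest fr top mem
  region : SameRegion H Hc
  owns : Owns Hc ({ F with icm := none } : Forest).owned
  shape : Shape F R mem
  placed : Placed Hc F.owned

/-- **`GifFreeMapObject(NULL)`** (`F.icm = none`): the heap is the entry's; the callee wrote stack only. -/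
theorem ih2_free_none {H : Heap} {rest : List Obj} {fr : List (Nat × FrameLayout)} {F : Forest} {R : Rd} {top top' : Nat}
    {mem mem' : Mem} {sp lo hi : Nat} (hinv : HeapInv H rest fr top mem) (hok : GifOK H F R mem)
    (hcur : 0x700000 ≤ R.cur ∧ R.cur + 16 ≤ 0x800000) (hbase : H.base = 0x800000) (hicm : F.icm = none)
    (hinv' : HeapInv H rest fr top' mem') (hun : ShadowUntouched mem mem')
    (hs : Mem.SameExcept [⟨sp - 48, sp⟩] mem mem')
    (h1 : 0x700000 ≤ lo) (h2 : lo ≤ sp - 48) (h3 : sp ≤ hi) (h4 : hi ≤ R.cur) :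
    ih2_Freed H rest fr F R top' H mem' ∧ rem R mem' = rem R mem ∧
      Mem.SameExcept [⟨lo, hi⟩, ⟨0x800000, 0x1000020⟩] mem mem' := by
  have hws : ∀ w, w ∈ [(⟨sp - 48, sp⟩ : Span)] → (0x700000 ≤ w.lo ∧ w.hi ≤ R.cur) ∨ (F.gif + 96 ≤ w.lo ∧ w.hi ≤ F.gif + 104) := by
    intro w hw
    have e := List.mem_singleton.mp hw
    rw [e]
    left
    simp only
    omega
  obtain ⟨_, hok', hrem'⟩ := ih2_env_carry hinv hok hcur hbase hun hs hws
  refine ⟨⟨hinv', SameRegion.refl H, ?_, hok'.shape, hok'.owns.placed hinv'.heap⟩, hrem', ?_⟩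
  · rw [Forest.set_icm_eq hicm]
    exact hok'.owns
  · refine hs.mono ?_
    intro w hw a k1 k2
    have e := List.mem_singleton.mp hw
    rw [e] at k1 k2
    simp only at k1 k2
    exact ⟨_, List.mem_cons_self, by simp only; omega, by simp only; omega⟩

/-- **`GifFreeMapObject(m.obj)`** (`F.icm = some m`): the heap is `(H.release m.colors).release m.obj`; the callee wrote its stack,
the state words of the two headers and the shadow of the two objects: all loose for the old heap. -/
theorem ih2_free_some {H : Heap} {rest : List Obj} {fr : List (Nat × FrameLayout)} {F : Forest} {R : Rd} {top top' : Nat}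
    {mem mem' : Mem} {m : Map} {sp lo hi : Nat} (hinv : HeapInv H rest fr top mem) (hok : GifOK H F R mem)
    (hcur : 0x700000 ≤ R.cur ∧ R.cur + 16 ≤ 0x800000) (hbase : H.base = 0x800000) (hicm : F.icm = some m)
    (hinv' : HeapInv ((H.release m.colors).release m.obj) rest fr top' mem')
    (hs : Mem.SameExcept
      [⟨sp - 48, sp⟩,
       ⟨m.colors - 24, m.colors - 16⟩,
       shadowSpan m.colors (m.colors + 3 * m.count),
       ⟨m.obj - 24, m.obj - 16⟩,
       shadowSpan m.obj (m.obj + 24)] mem mem')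
    (h1 : 0x700000 ≤ lo) (h2 : lo ≤ sp - 48) (h3 : sp ≤ hi) (h4 : hi ≤ R.cur) :
    ih2_Freed H rest fr F R top' ((H.release m.colors).release m.obj) mem' ∧ rem R mem' = rem R mem ∧
      Mem.SameExcept [⟨lo, hi⟩, ⟨0x800000, 0x1000020⟩] mem mem' := by
  have hk := hinv.heap
  obtain ⟨hl1, hl2, _, _⟩ := hok.icm_live hicm
  obtain ⟨c1, hc1⟩ := hl1
  obtain ⟨c2, hc2⟩ := hl2
  have hplaced := hok.owns.placed hk
  have hloose : ∀ w, w ∈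
      [(⟨sp - 48, sp⟩ : Span),
       ⟨m.colors - 24, m.colors - 16⟩,
       shadowSpan m.colors (m.colors + 3 * m.count),
       ⟨m.obj - 24, m.obj - 16⟩,
       shadowSpan m.obj (m.obj + 24)] → Loose H F R w := by
    simp only [List.forall_mem_cons, List.not_mem_nil, false_imp_iff, implies_true, and_true]
    refine ⟨?_, ?_, ?_, ?_, ?_⟩
    · exact Loose.stack hk (by simp only; omega) (by simp only; omega) (by simp only; omega)
    · exact Loose.header hk hcur hc2 (by simp only; omega) (by simp only; omega)
    · refine Loose.shadow hk hcur.2 ?_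
      unfold shadowSpan
      simp only
      omega
    · exact Loose.header hk hcur hc1 (by simp only; omega) (by simp only; omega)
    · refine Loose.shadow hk hcur.2 ?_
      unfold shadowSpan
      simp only
      omega
  have hshape := hok.shape.sameExcept hplaced hk hcur hs hloose
  refine ⟨⟨hinv', ?_, hok.owns.free_icm hicm, hshape, (hplaced.release m.colors).release m.obj⟩, ?_, ?_⟩
  · exact (SameRegion.release H m.colors).trans (SameRegion.release _ m.obj)
  · exact rem_loose hs hloose hk hplaced hcur
  · -- the coarse footprint: the headers and the shadow lie in the contract's window over the heap's region and its shadow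
    have r1 := hk.obj_range hc1
    have r2 := hk.obj_range hc2
    have i1 := hk.obj_inside hc1
    have i2 := hk.obj_inside hc2
    simp only at r1 r2 i1 i2
    rw [hbase] at r1 r2
    refine hs.mono ?_
    intro w hw a k1 k2
    simp only [List.mem_cons, List.not_mem_nil, or_false] at hw
    rcases hw with e | e | e | e | e
    · rw [e] at k1 k2
      simp only at k1 k2
      exact ⟨_, List.mem_cons_self, by simp only; omega, by simp only; omega⟩
    · rw [e] at k1 k2
      simp only at k1 k2
      exact ⟨_, List.mem_cons_of_mem _ List.mem_cons_self, by simp only; omega, by simp only; omega⟩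
    · rw [e] at k1 k2
      unfold shadowSpan at k1 k2
      simp only at k1 k2
      exact ⟨_, List.mem_cons_of_mem _ List.mem_cons_self, by simp only; omega, by simp only; omega⟩
    · rw [e] at k1 k2
      simp only at k1 k2
      exact ⟨_, List.mem_cons_of_mem _ List.mem_cons_self, by simp only; omega, by simp only; omega⟩
    · rw [e] at k1 k2
      unfold shadowSpan at k1 k2
      simp only at k1 k2
      exact ⟨_, List.mem_cons_of_mem _ List.mem_cons_self, by simp only; omega, by simp only; omega⟩

/-- **THE STORE OF NULL to `gif.Image.ColorMap`** (dgif_lib.c:381) behind the free: `mem'` differs from `mem` in stack windows (the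
check call's return address) and in the field; the field reads 0. The whole state invariant holds again, for the forest without
`icm`. -/
theorem ih2_null_store {H : Heap} {rest : List Obj} {fr : List (Nat × FrameLayout)} {F : Forest} {R : Rd} {top : Nat} {Hc : Heap}
    {mem mem' : Mem} {ws : List Span} (hf : ih2_Freed H rest fr F R top Hc mem)
    (hcur : 0x700000 ≤ R.cur ∧ R.cur + 16 ≤ 0x800000) (hbase : H.base = 0x800000)
    (hun : ShadowUntouched mem mem') (hs : Mem.SameExcept ws mem mem')
    (hws : ∀ w, w ∈ ws → (0x700000 ≤ w.lo ∧ w.hi ≤ R.cur) ∨ (F.gif + 64 ≤ w.lo ∧ w.hi ≤ F.gif + 72))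
    (hnull : GifFileType.Image.ColorMap mem' F.gif = 0) :
    HeapInv Hc rest fr top mem' ∧ GifOK Hc ({ F with icm := none } : Forest) R mem' ∧ rem R mem' = rem R mem := by
  have hk := hf.inv.heap
  have hcbase : Hc.base = 0x800000 := hf.region.1.trans hbase
  have hglive : Hc.Live F.gif 120 := hf.owns.live (F.gif, 120) List.mem_cons_self
  have hgin := hf.owns.inside hk (o := (F.gif, 120)) List.mem_cons_self
  simp only at hgin
  have hwin : ∀ w, w ∈ ws → HeapWin Hc w := by
    intro w hw
    rcases hws w hw with ⟨h1, h2⟩ | ⟨h1, h2⟩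
    · exact HeapWin.offHeap hk (Or.inl (by omega))
    · exact HeapWin.live hk hglive (by omega) (by omega)
  have hl : ∀ w, w ∈ ws → Loose Hc F R w ∨ (F.gif + 64 ≤ w.lo ∧ w.hi ≤ F.gif + 72) := by
    intro w hw
    rcases hws w hw with ⟨h1, h2⟩ | h
    · exact Or.inl (Loose.stack hk h1 (by omega) h2)
    · exact Or.inr h
  have hshape := hf.shape.set_icm hf.placed hk hcur hs hl none hnull
  refine ⟨hf.inv.sameExcept hun hs hwin, ⟨hf.owns, hshape⟩, ?_⟩
  apply rem_sameExcept hs (by omega)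
  intro w hw
  rcases hws w hw with ⟨h1, h2⟩ | ⟨h1, h2⟩
  · omega
  · omega

/-- **108EEFH (ret8) … 108EF8H | 108F8BH … 108E78H** (dgif_lib.c:378-382): `cmp eax, 1`; one byte read: to 108EF8H. A short read:
the checked store of `gif.Error = D_GIF_ERR_READ_FAILED`, the checked load of `gif.Image.ColorMap`, `GifFreeMapObject` of it (NULL
or the map of the forest: the ghosts `colors`, `n` are the map's when there is one), the checked store of NULL, `r13d = 0`. -/
theorem ih2_seg_free (Lay : Layout) (hLay : Lay.hi = 0x1000000) (μ : Microarch) (hμ : UserX.MicroOK μ) (u₀ : State)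
    (hcode : HasCodeNat Lay u₀ Gif.L.DGifGetImageHeader.entry Gif.Code.code_DGifGetImageHeader.nat Gif.L.DGifGetImageHeader.size)
    (H : Heap) (rest : List Obj) (frames : List (Nat × FrameLayout)) (F : Forest) (R : Rd) (e : State) (ret : Word)
    (colors n : Nat) (hgh : ∀ m, F.icm = some m → colors = m.colors ∧ n = 3 * m.count)
    (h_GifFreeMapObject : Calls Lay μ ProgX.Base.WayInv (ProgX.Base.conv u₀) Gif.L.GifFreeMapObject.entry
      (Gif.Spec.GifFreeMapObject.spec H rest (DGifGetImageHeader.framesIn frames e) colors n))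
    (h_asan_store4_noabort : Asan.SmallCheck Lay μ ProgX.Base.WayInv (ProgX.Base.CodeOK u₀) [.rax, .rcx, .rdx] 4
      ProgX.Base.L.__asan_store4_noabort.entry)
    (h_asan_load8_noabort : Asan.SmallCheck Lay μ ProgX.Base.WayInv (ProgX.Base.CodeOK u₀) [.rax, .rcx, .rdx] 8
      ProgX.Base.L.__asan_load8_noabort.entry)
    (h_asan_store8_noabort : Asan.SmallCheck Lay μ ProgX.Base.WayInv (ProgX.Base.CodeOK u₀) [.rax, .rcx, .rdx] 8
      ProgX.Base.L.__asan_store8_noabort.entry)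
    (v : State) (hat : DGifGetImageHeader.Mid Gif.L.DGifGetImageHeader.ret8 H rest frames F R H F u₀ e ret v) :
    ReachVia Lay μ ProgX.Base.WayInv v (fun w =>
      DGifGetImageHeader.Mid Gif.L.DGifGetImageHeader.at_108ef8 H rest frames F R H F u₀ e ret w ∨
      ∃ (H' : Heap) (F' : Forest), DGifGetImageHeader.Done H rest frames F R H' F' u₀ e ret w) := by
  -- THE PRELUDE
  obtain ⟨hbody, hr12⟩ := hat
  have he := hbody.entry
  v_entry he
  obtain ⟨henv, hrdi⟩ := hbody.pre
  have w_rip := hbody.rip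
  have c_rsp : v.reg .rsp = e.reg .rsp - 136 := hbody.rsp
  have c_rbx : v.reg .rbx = e.reg .rdi := hbody.rbx
  -- `eax` as a variable `z` (the branch fact of `cmp eax, 1` speaks of it)
  obtain ⟨z, c_rax⟩ : ∃ z, v.reg .rax = z := ⟨_, rfl⟩
  have w_kept : RegsKept [.rsp] v v := RegsKept.refl _ _
  have w_eq : Mem.EqOn ProgX.Base.L.textLo ProgX.Base.L.textHi u₀.mem v.mem := ProgX.Base.conv_code_eqOn hbody.code
  have hdf := (show abiInv _ from hbody.abi).1
  have hmx := (show abiInv _ from hbody.abi).2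
  have hsse := ProgX.Base.sseOK_of_abiInv hbody.abi
  have hcur := henv.ctx.cursor_range henv.heap.inv.shadow
  have hgin := henv.ok.owns.inside henv.heap.inv.heap (o := (F.gif, 120)) List.mem_cons_self
  have hbase := henv.heap.base
  simp only at hgin
  rw [hbase] at hgin
  have hg1 := hgin.1
  have hg2 := hgin.2.2.2.2
  clear hgin
  -- gif is live under the body's frames: what the check goals ask
  have hgl : LiveIn (H.liveObjs ++ rest) (DGifGetImageHeader.framesIn frames e) F.gif 120 :=
    hbody.ok.gif_live.liveIn rest _ (Nat.le_refl _) (Nat.le_refl _)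
  -- the pointer `gif.Image.ColorMap`, as a variable `p`: the load at 108FA7H delivers it
  obtain ⟨p, hp⟩ : ∃ p, GifFileType.Image.ColorMap v.mem F.gif = p := ⟨_, rfl⟩
  have hp' := hp
  simp only [gfield] at hp'
  have hplt : p < 2 ^ 64 := by
    rw [← hp']
    exact rd_lt _ _ 8
  have l_icm : v.mem.readLE (e.reg .rdi + 64) 8 = p := by
    rw [rd_eq_readLE v.mem _ (F.gif + 64) 8 (by u_omega)]
    exact hp'
  have hpicm : MapAt F.icm p v.mem := by
    rw [← hp]
    exact hbody.ok.shape.icm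
  have hpnat : (UInt64.ofNat p).toNat = p := toNat_ofNat_addr p hplt
  -- THE WALK, to 108EF8H or to the return address of GifFreeMapObject
  u_walk hcode [hμ.vendor] until [Gif.L.DGifGetImageHeader.at_108ef8, Gif.L.DGifGetImageHeader.ret19]
    span [ProgX.Base.L.textLo, ProgX.Base.L.textHi] side (v_side)
  case check_108f8f =>
    -- dgif_lib.c:379 the store of `gif.Error`
    have hun : ShadowUntouched v.mem s_108f8f.mem := by v_untouched
    exact hgl.accSmall hbody.inv.shadow hun _ 4 (by decide) (by u_omega) (by u_omega)
  case check_108fa2 =>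
    -- dgif_lib.c:380 the load of `gif.Image.ColorMap`
    have hun : ShadowUntouched v.mem s_108fa2.mem := by v_untouched
    exact hgl.accSmall hbody.inv.shadow hun _ 8 (by decide) (by u_omega) (by u_omega)
  case call_inv =>
    v_inv
  case pre_108fab =>
    -- GIFFREEMAPOBJECT'S PRECONDITION. The environment at its entry: since `v` the return addresses of two check calls and of this
    -- call were pushed, and `gif.Error` was stored
    have hs : Mem.SameExcept
      [⟨(e.reg .rsp).toNat - 448, (e.reg .rsp).toNat - 136⟩,
       ⟨F.gif + 96, F.gif + 100⟩] v.mem s_108fab.mem := by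
      rw [w_mem]
      u_same
    have hun : ShadowUntouched v.mem s_108fab.mem := by v_untouched
    obtain ⟨hinvA, hokA, -⟩ := ih2_env_carry hbody.inv hbody.ok ⟨hcur.1, hcur.2.1⟩ hbase hun hs (by
      simp only [List.forall_mem_cons, List.not_mem_nil, false_imp_iff, implies_true, and_true]
      omega)
    have henv' : Env H rest (DGifGetImageHeader.framesIn frames e) F R s_108fab := by
      refine henv.at_call (lo := (e.reg .rsp).toNat - 448) hinvA hokA (Mem.SameExcept.refl _ _) (by omega) (by omega) ?_ ?_ ?_
      · rw [w_rsp]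
        u_omega
      · rw [w_rsp]
        u_omega
      · rw [w_rsp]
        u_omega
    refine ⟨henv'.heap, ?_⟩
    rw [w_rdi, hpnat]
    cases hicm : F.icm with
    | none =>
      -- no local map: the argument is NULL
      rw [hicm] at hpicm
      exact Or.inl hpicm
    | some m =>
      -- the map of the forest: both objects live and different, its `Colors` field agrees
      rw [hicm] at hpicm
      obtain ⟨ec, en⟩ := hgh m hicm
      obtain ⟨hl1, hl2, hne, hcol⟩ := hokA.icm_live hicm
      rw [hpicm.1, ec, en]
      exact Or.inr ⟨hl1, hl2, hne, hcol⟩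
  · -- 0x108fb0 (ret19): GIFFREEMAPOBJECT HAS RETURNED
    -- the memory at its entry, since `v`: return addresses on the stack, `gif.Error`
    have hsA : Mem.SameExcept
      [⟨(e.reg .rsp).toNat - 448, (e.reg .rsp).toNat - 136⟩,
       ⟨F.gif + 96, F.gif + 100⟩] v.mem s_108fab.mem := by
      rw [w_mem_108fab]
      u_same
    have hsA' : Mem.SameExcept
      [⟨(e.reg .rsp).toNat - 448, (e.reg .rsp).toNat - 136⟩,
       ⟨0x800000, 0x1000020⟩] v.mem s_108fab.mem := by
      rw [w_mem_108fab]
      u_same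
    have hunA : ShadowUntouched v.mem s_108fab.mem := by
      rw [w_mem_108fab]
      v_untouched
    obtain ⟨hinvA, hokA, hremA⟩ := ih2_env_carry hbody.inv hbody.ok ⟨hcur.1, hcur.2.1⟩ hbase hunA hsA (by
      simp only [List.forall_mem_cons, List.not_mem_nil, false_imp_iff, implies_true, and_true]
      omega)
    -- what the next walk reads of the returned state; the callee's footprint as numbers
    have w_eq := ProgX.Base.conv_code_eqOn w_code
    have w_df := (show abiInv _ from w_inv).1
    have w_mx := (show abiInv _ from w_inv).2
    have w_sse := ProgX.Base.sseOK_of_abiInv w_inv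
    have e_sp : (e.reg .rsp - 144).toNat = (e.reg .rsp).toNat - 144 := by u_omega
    have e_top : (s_108fab.reg .rsp).toNat + 8 = (e.reg .rsp).toNat - 136 := by
      rw [w_rsp_108fab]
      u_omega
    simp only [X86.User.Spec.footprint, vspec, w_rsp_108fab, w_rdi_108fab, hpnat, e_sp] at w_same
    obtain ⟨hpost0, hpost1⟩ := w_post
    rw [w_rdi_108fab, hpnat] at hpost0 hpost1
    -- THE TWO OUTCOMES, in one form: the present heap `Hc`
    obtain ⟨Hc, hfreed, hremB, hsB⟩ : ∃ Hc,
        ih2_Freed H rest (DGifGetImageHeader.framesIn frames e) F R ((e.reg .rsp).toNat - 136) Hc s_108fabr.mem ∧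
        rem R s_108fabr.mem = rem R s_108fab.mem ∧
        Mem.SameExcept
          [⟨(e.reg .rsp).toNat - 448, (e.reg .rsp).toNat - 136⟩,
           ⟨0x800000, 0x1000020⟩] s_108fab.mem s_108fabr.mem := by
      cases hicm : F.icm with
      | none =>
        -- `GifFreeMapObject(NULL)`: nothing happened
        rw [hicm] at hpicm
        obtain ⟨hinv2, hun2, hs2⟩ := hpost0 hpicm
        rw [e_top] at hinv2
        rw [w_rsp_108fab, e_sp] at hs2
        exact ⟨H, ih2_free_none hinvA hokA ⟨hcur.1, hcur.2.1⟩ hbase hicm hinv2 hun2 hs2 (by omega) (by omega) (by omega)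
          (by omega)⟩
      | some m =>
        -- the map of the forest was freed
        rw [hicm] at hpicm
        obtain ⟨ec, en⟩ := hgh m hicm
        have hpm : p = m.obj := hpicm.1
        have hge := live_base_ge hinvA.heap (hokA.icm_live hicm).1
        have hinv2 := hpost1 (by omega)
        rw [e_top, hpm, ec] at hinv2
        rw [hpm, ec, en] at w_same
        exact ⟨_, ih2_free_some hinvA hokA ⟨hcur.1, hcur.2.1⟩ hbase hicm hinv2 w_same (by omega) (by omega) (by omega)
          (by omega)⟩
    clear w_same hpost0 hpost1
    -- gif is live in the present heap too
    have hglc : LiveIn (Hc.liveObjs ++ rest) (DGifGetImageHeader.framesIn frames e) F.gif 120 :=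
      (hfreed.owns.live (F.gif, 120) List.mem_cons_self).liveIn rest _ (Nat.le_refl _) (Nat.le_refl _)
    -- THE WALK, to the epilogue
    u_walk hcode [hμ.vendor] until [Gif.L.DGifGetImageHeader.at_108e78]
      span [ProgX.Base.L.textLo, ProgX.Base.L.textHi] side (v_side)
    case check_108fb3 =>
      -- dgif_lib.c:381 the store of NULL to `gif.Image.ColorMap`
      have hun : ShadowUntouched s_108fabr.mem s_108fb3.mem := by v_untouched
      exact hglc.accSmall hfreed.inv.shadow hun _ 8 (by decide) (by u_omega) (by u_omega)
    -- 0x108e78 FROM 0x108fc6: the field is NULL again, `r13d = 0` (GIF_ERROR)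
    have hsC : Mem.SameExcept
      [⟨(e.reg .rsp).toNat - 448, (e.reg .rsp).toNat - 136⟩,
       ⟨F.gif + 64, F.gif + 72⟩] s_108fabr.mem s_108fc6.mem := by
      rw [w_mem]
      u_same
    have hsC' : Mem.SameExcept
      [⟨(e.reg .rsp).toNat - 448, (e.reg .rsp).toNat - 136⟩,
       ⟨0x800000, 0x1000020⟩] s_108fabr.mem s_108fc6.mem := by
      rw [w_mem]
      u_same
    have hunC : ShadowUntouched s_108fabr.mem s_108fc6.mem := by v_untouched
    have hnull : GifFileType.Image.ColorMap s_108fc6.mem F.gif = 0 := by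
      simp only [gfield]
      rw [w_mem, rd_writeLE_same _ (e.reg .rdi + 64) 8 0 _ (by u_omega) (by decide)]
    obtain ⟨hinvF, hokF, hremF⟩ := ih2_null_store hfreed ⟨hcur.1, hcur.2.1⟩ hbase hunC hsC (by
      simp only [List.forall_mem_cons, List.not_mem_nil, false_imp_iff, implies_true, and_true]
      omega) hnull
    -- THE EXIT ASSERTION: `Done` for the present heap and the forest without `icm`
    have hbody1 : DGifGetImageHeader.Body Gif.L.DGifGetImageHeader.at_108e78 H rest frames F R Hc
        ({ F with icm := none } : Forest) u₀ e ret s_108fc6 := by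
      refine ih2_body_carry hbody w_rip w_rsp (w_kept.get .rbx rfl) (w_kept.get .rbp rfl) (ProgX.Base.conv_code_in w_eq) ?_
        ((hsA'.trans hsB).trans hsC') ?_ hinvF hfreed.region ⟨rfl, rfl, rfl, rfl, rfl⟩ hokF ?_
      · refine ProgX.Base.abiInv_of ?_ ?_
        · rw [w_flags]
          exact w_df_108fb3
        · rw [w_mxcsr]
          exact w_mx
      · simp only [List.forall_mem_cons, List.not_mem_nil, false_imp_iff, implies_true, and_true, ih2_Win]
        omega
      · rw [hremF, hremB, hremA]
        exact Nat.le_refl _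
    refine ReachVia.done (Or.inr ⟨Hc, _, hbody1, ?_, ?_⟩)
    · right
      rw [w_r13]
      decide
    · intro h1
      rw [w_r13] at h1
      exact absurd h1 (by decide)
  · -- 0x108ef8: one byte was read; nothing was stored
    have hs : Mem.SameExcept [] v.mem s_108ef2.mem := by
      rw [w_mem]
      exact Mem.SameExcept.refl _ _
    refine ReachVia.done (Or.inl ⟨?_, ?_⟩)
    · refine ih2_body_carry hbody w_rip w_rsp (w_kept.get .rbx rfl) (w_kept.get .rbp rfl) (ProgX.Base.conv_code_in w_eq) ?_ hs
        ?_ ?_ (SameRegion.refl H) (Forest.SameButIcm.refl F) ?_ ?_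
      · refine ProgX.Base.abiInv_of ?_ ?_
        · rw [w_flags]
          simp only [X86.User.df_setStatus]
          exact hdf
        · rw [w_mxcsr]
          exact hmx
      · intro w hw
        exact absurd hw List.not_mem_nil
      · rw [w_mem]
        exact hbody.inv
      · rw [w_mem]
        exact hbody.ok
      · rw [w_mem]
        exact Nat.le_refl _
    · rw [w_kept.get .r12 rfl]
      exact hr12

end Gif.Spec.DGifGetImageHeader_2
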